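-- pv_equiv track=rewrite | github.com/cowboysmall-comp/hackerrank | src/algorithms/dynamic_programming/candles_counting.py | candles_counting
-- ===== SOURCE A (Python) =====
-- def candles_counting(N, K, A):
--     def read(T, i):
--         s = 0
--         while i > 0:
--             s += T[i]
--             s %= 1000000007
--             i -= (i & -i)
--         return s
--
--     def update(T, i, v):
--         while i <= 50010:
--             T[i] += v
--             T[i] %= 1000000007
--             i    += (i & -i)
--         return v
--
--     def count_bits(b):
--         c = 0
--         while b:
--             b &= b - 1
--             c += 1
--         return c
--
--     L = 2 ** K
--     R = 0
--
--     for i in range(L):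
--         T = [0 for _ in range(50010)]
--         t = 0
--
--         for j in range(N):
--             h, c = A[j]
--             if (i >> (c - 1)) & 1:
--                 t += update(T, h, read(T, h - 1) + 1)
--                 t %= 1000000007
--
--         if count_bits(i) % 2 == K % 2:
--             R += t
--             R %= 1000000007
--         else:
--             R -= t
--             R %= 1000000007
--
--     return R
-- ===== SOURCE B (Python) =====
-- def candles_counting(N, K, A):
--     MOD = 1000000007
--
--     def count_bits(b):
--         c = 0
--         while b:
--             b &= b - 1
--             c += 1
--         return c
--
--     R = 0
--     for i in range(2 ** K):
--         picked = []
--         t = 0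
--         for j in range(N):
--             h, c = A[j]
--             if (i >> (c - 1)) & 1:
--                 s = 0
--                 for g, d in picked:
--                     if g < h:
--                         s += d
--                 dp = (1 + s) % MOD
--                 picked.append((h, dp))
--                 t = (t + dp) % MOD
--         if count_bits(i) % 2 == K % 2:
--             R = (R + t) % MOD
--         else:
--             R = (R - t) % MOD
--     return R
-- ===== Notes on version B (the rewrite author's own statement) =====
-- stated objective: alternative
-- what changed: The inner loop's Fenwick (binary indexed) tree over a fixed 50010-slot array is replaced by a direct DP that keeps the list of already-processed qualifying (height, dp) pairs and sums the dp of earlier smaller heights by a plain scan; the 2^K inclusion-exclusion outer loop and popcount sign logic are kept.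
import Mathlib
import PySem

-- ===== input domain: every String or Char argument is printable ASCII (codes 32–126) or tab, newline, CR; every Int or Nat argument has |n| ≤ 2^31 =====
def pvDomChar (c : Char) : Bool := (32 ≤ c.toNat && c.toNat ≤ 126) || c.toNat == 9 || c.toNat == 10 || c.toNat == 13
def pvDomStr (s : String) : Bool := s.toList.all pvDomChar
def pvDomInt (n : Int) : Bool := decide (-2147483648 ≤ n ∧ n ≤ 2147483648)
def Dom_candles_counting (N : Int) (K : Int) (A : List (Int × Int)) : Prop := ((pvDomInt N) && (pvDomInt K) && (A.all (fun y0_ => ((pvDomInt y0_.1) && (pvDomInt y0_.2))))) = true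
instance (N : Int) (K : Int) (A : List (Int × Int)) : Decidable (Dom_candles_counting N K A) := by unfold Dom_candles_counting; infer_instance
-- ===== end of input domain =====

-- B replaces A's Fenwick (binary indexed) tree over a fixed 50010-slot array by a direct
-- quadratic DP over the list of already-processed qualifying elements (objective: alternative;
-- equal return value on all inputs admitted by Pre_).

-- ===== PORT A =====
-- Helper facts cited by the ports' `decreasing_by` clauses (about `n - (n &&& (n-1))`,
-- the Nat value of Python's `i & -i` for positive i).
def pvM : Int := 1000000007

def lbN (n : Nat) : Nat := n - (n &&& (n-1))

theorem lbN_land_le (n : Nat) : n &&& (n-1) ≤ n-1 := Nat.and_le_right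

-- Python's `i & -i` (ported literally as PySem.Int.band i (-i)) equals lbN on positive ints.
theorem lbI_natCast (n : Nat) (h : 0 < n) : PySem.Int.band (↑n) (-↑n) = ↑(lbN n) := by
  simp only [PySem.Int.band]
  rw [if_pos (by positivity), if_neg (by omega)]
  have h1 : ((n:Int)).toNat = n := by omega
  have h2 : (- -(n:Int) - 1).toNat = n - 1 := by omega
  rw [h1, h2]; rfl

theorem lbI_bounds (i : Int) (h : 0 < i) : 1 ≤ PySem.Int.band i (-i) ∧ PySem.Int.band i (-i) ≤ i := by
  obtain ⟨n, rfl⟩ : ∃ n : Nat, i = ↑n := ⟨i.toNat, by omega⟩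
  rw [lbI_natCast n (by omega)]
  have h1 : n &&& (n-1) ≤ n-1 := lbN_land_le n
  unfold lbN; omega

-- `read(T, i)`: s = 0; while i > 0: s += T[i]; s %= M; i -= i & -i.
-- T[i] is ported as pyGetD T i 0; the default 0 is only reached where Python would raise
-- IndexError, which cannot happen on inputs admitted by Pre_.
def readGo (T : List Int) (i s : Int) : Int :=
  if _hpos : 0 < i then
    readGo T (i - PySem.Int.band i (-i)) (PySem.Int.mod (s + PySem.List.pyGetD T i 0) pvM)
  else s
termination_by i.toNat
decreasing_by
  have := lbI_bounds i _hpos; omega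

-- `update(T, i, v)`: while i <= 50010: T[i] += v; T[i] %= M; i += i & -i; returns v (the
-- caller adds v itself).  The extra guard 0 < i only makes the loop total: Python diverges
-- for i ≤ 0 (outside Pre_).  `List.set` at an out-of-range index is a no-op exactly where
-- Python would raise IndexError (outside Pre_).
def updGo (T : List Int) (i v : Int) : List Int :=
  if _h : 0 < i ∧ i ≤ 50010 then
    updGo (T.set i.toNat (PySem.Int.mod (PySem.List.pyGetD T i 0 + v) pvM)) (i + PySem.Int.band i (-i)) v
  else T
termination_by (50011 - i).toNat
decreasing_by
  have := lbI_bounds i _h.1; omega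

-- `count_bits(b)`: c = 0; while b: b &= b - 1; c += 1.  Guard 0 < b makes it total
-- (b is always ≥ 0 here, coming from range(2**K); Python diverges for b < 0).
def cbGo (b c : Int) : Int :=
  if hpos : 0 < b then cbGo (PySem.Int.band b (b-1)) (c+1) else c
termination_by b.toNat
decreasing_by
  obtain ⟨n, rfl⟩ : ∃ n : Nat, b = ↑n := ⟨b.toNat, by omega⟩
  have h1 : (n : Int) - 1 = ↑(n-1) := by omega
  rw [h1, PySem.Int.band_natCast]
  have := lbN_land_le n; omega

-- `2 ** K` as the bound of `range`; exact for K ≥ 0 (Pre_): Python raises TypeError on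
-- range(2**K) for K < 0 (2**K is a float there).
-- `(i >> (c - 1)) & 1`: i ≥ 0 always (it comes from range), and c ≥ 1 under Pre_, so the
-- shift count (c-1).toNat is exact; `>>` is Lean's `>>>`, `& 1` is PySem.Int.band.
def candles_counting (N : Int) (K : Int) (A : List (Int × Int)) : Int :=
  (PySem.List.pyRange 0 ((2:Int) ^ K.toNat)).foldl (fun R (i : Int) =>
    let Tt := (PySem.List.pyRange 0 N).foldl (fun (st : List Int × Int) j =>
      let hc := PySem.List.pyGetD A j (0, 0)  -- h, c = A[j]; in range under Pre_
      if PySem.Int.band (i >>> (hc.2 - 1).toNat) 1 = 1 then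
        let v := readGo st.1 (hc.1 - 1) 0 + 1
        (updGo st.1 hc.1 v, PySem.Int.mod (st.2 + v) pvM)
      else st) (List.replicate 50010 (0:Int), 0)
    if PySem.Int.mod (cbGo i 0) 2 = PySem.Int.mod K 2
    then PySem.Int.mod (R + Tt.2) pvM
    else PySem.Int.mod (R - Tt.2) pvM) 0

-- ===== PORT B =====
-- B's count_bits: same popcount loop as A's (Source B keeps it verbatim).
def cbGoB (b c : Int) : Int :=
  if hpos : 0 < b then cbGoB (PySem.Int.band b (b-1)) (c+1) else c
termination_by b.toNat
decreasing_by
  obtain ⟨n, rfl⟩ : ∃ n : Nat, b = ↑n := ⟨b.toNat, by omega⟩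
  have h1 : (n : Int) - 1 = ↑(n-1) := by omega
  rw [h1, PySem.Int.band_natCast]
  have := lbN_land_le n; omega

-- Inner loop of B: `picked` is the list of (height, dp) of qualifying elements seen so far;
-- dp = (1 + sum of d over earlier (g, d) with g < h) % M; no Fenwick array.
def candles_counting_alt (N : Int) (K : Int) (A : List (Int × Int)) : Int :=
  (PySem.List.pyRange 0 ((2:Int) ^ K.toNat)).foldl (fun R (i : Int) =>
    let pt := (PySem.List.pyRange 0 N).foldl (fun (st : List (Int × Int) × Int) j =>
      let hc := PySem.List.pyGetD A j (0, 0)  -- h, c = A[j]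
      if PySem.Int.band (i >>> (hc.2 - 1).toNat) 1 = 1 then
        let s := st.1.foldl (fun s p => if p.1 < hc.1 then s + p.2 else s) 0
        let dp := PySem.Int.mod (1 + s) pvM
        (st.1 ++ [(hc.1, dp)], PySem.Int.mod (st.2 + dp) pvM)
      else st) ([], 0)
    if PySem.Int.mod (cbGoB i 0) 2 = PySem.Int.mod K 2
    then PySem.Int.mod (R + pt.2) pvM
    else PySem.Int.mod (R - pt.2) pvM) 0

-- ===== PRECONDITION & SPEC =====
-- Pre_ = exactly the inputs on which Python A returns normally: N ≤ len(A) (A[j] would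
-- raise IndexError; N < 0 just makes the inner loop empty), 0 ≤ K (2**K is a float for K < 0: range raises TypeError), every
-- looked-at colour c ≥ 1 (i >> (c-1) raises ValueError for c ≤ 0), and every element whose
-- colour can ever qualify (c ≤ K) has height in [1, 50008]: update diverges for h ≤ 0 and
-- raises IndexError (the hard-coded array bound 50010) for h = 50009, 50010 and ≥ 50011.
def Pre_candles_counting (N : Int) (K : Int) (A : List (Int × Int)) : Prop :=
  N ≤ A.length ∧ 0 ≤ K ∧
  ∀ p ∈ A.take N.toNat, 1 ≤ p.2 ∧ (p.2 ≤ K → 1 ≤ p.1 ∧ p.1 ≤ 50008)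
instance (N : Int) (K : Int) (A : List (Int × Int)) : Decidable (Pre_candles_counting N K A) := by
  unfold Pre_candles_counting; infer_instance

def pvWitness_candles_counting : Int × Int × (List (Int × Int)) := (2, 2, [(3, 1), (1, 2)])

def Spec_candles_counting (N : Int) (K : Int) (A : List (Int × Int)) (out : Int) : Prop := out = candles_counting_alt N K A
instance (N : Int) (K : Int) (A : List (Int × Int)) (out : Int) : Decidable (Spec_candles_counting N K A out) := by unfold Spec_candles_counting; infer_instance

-- ===== CLAIM (what is proved, stated in full; the proofs are below) =====
def Claim_equal_candles_counting : Prop := ∀ (N : Int) (K : Int) (A : List (Int × Int)), Dom_candles_counting N K A → Pre_candles_counting N K A → Spec_candles_counting N K A (candles_counting N K A)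

-- ===== LEMMAS AND PROOFS =====

theorem pvM_pos : (0:Int) < pvM := by norm_num [pvM]

theorem pvmod_eq (a : Int) : PySem.Int.mod a pvM = a % pvM :=
  PySem.Int.mod_eq_emod_of_pos pvM_pos

-- ---------- the 2-adic structure of lowbit ----------

theorem land_pred_decomp (a m : Nat) (hm : m % 2 = 1) :
    (2^a*m) &&& (2^a*m - 1) = 2^a*(m-1) := by
  have hm1 : 1 ≤ m := by omega
  have hpa : 0 < 2^a := Nat.two_pow_pos a
  have hmul : 2^a*(m-1) + 2^a = 2^a*m := by
    have : 2^a*(m-1) + 2^a = 2^a*((m-1)+1) := by ring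
    rw [this, Nat.sub_add_cancel hm1]
  have hsub : 2^a*m - 1 = 2^a*(m-1) + (2^a - 1) := by omega
  apply Nat.eq_of_testBit_eq
  intro i
  rw [Nat.testBit_and, hsub]
  have e1 : 2^a*m = 2^a*m + 0 := by omega
  have e2 : 2^a*(m-1) = 2^a*(m-1) + 0 := by omega
  rw [e1, Nat.testBit_two_pow_mul_add _ hpa,
      Nat.testBit_two_pow_mul_add _ (show 2^a - 1 < 2^a by omega)]
  conv_rhs => rw [e2, Nat.testBit_two_pow_mul_add _ hpa]
  by_cases hia : i < a
  · simp [hia]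
  · simp only [if_neg hia]
    rcases Nat.eq_zero_or_pos (i - a) with hj | hj
    · rw [hj]
      have h1 : m.testBit 0 = true := by simp [Nat.testBit_zero]; omega
      have h2 : (m-1).testBit 0 = false := by simp [Nat.testBit_zero]; omega
      simp [h1, h2]
    · obtain ⟨j, hjj⟩ : ∃ j, i - a = j + 1 := ⟨i - a - 1, by omega⟩
      rw [hjj, Nat.testBit_add_one, Nat.testBit_add_one,
          show m / 2 = (m-1)/2 by omega]
      exact Bool.and_self _

theorem lbN_decomp (a m : Nat) (hm : m % 2 = 1) : lbN (2^a*m) = 2^a := by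
  have hm1 : 1 ≤ m := by omega
  have hpa : 0 < 2^a := Nat.two_pow_pos a
  have hmul : 2^a*(m-1) + 2^a = 2^a*m := by
    have : 2^a*(m-1) + 2^a = 2^a*((m-1)+1) := by ring
    rw [this, Nat.sub_add_cancel hm1]
  unfold lbN
  rw [land_pred_decomp a m hm]
  omega

theorem exists_decomp (n : Nat) (h : 0 < n) : ∃ a m, m % 2 = 1 ∧ n = 2^a*m := by
  obtain ⟨a, m, hm, he⟩ := Nat.exists_eq_two_pow_mul_odd (n := n) (by omega)
  exact ⟨a, m, Nat.odd_iff.mp hm, he⟩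

theorem lbN_pos {n : Nat} (h : 0 < n) : 0 < lbN n := by
  obtain ⟨a, m, hm, rfl⟩ := exists_decomp n h
  rw [lbN_decomp a m hm]; exact Nat.two_pow_pos a

theorem lbN_le {n : Nat} (h : 0 < n) : lbN n ≤ n := by
  obtain ⟨a, m, hm, rfl⟩ := exists_decomp n h
  rw [lbN_decomp a m hm]
  calc 2^a = 2^a * 1 := by omega
  _ ≤ 2^a * m := Nat.mul_le_mul_left _ (by omega)

theorem lbN_step {n : Nat} (h : 0 < n) : 2 * lbN n ≤ lbN (n + lbN n) := by
  obtain ⟨a, m, hm, rfl⟩ := exists_decomp n h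
  rw [lbN_decomp a m hm]
  have he : 2^a*m + 2^a = 2^a*(m+1) := by ring
  rw [he]
  obtain ⟨c, m', hm', hcm⟩ := exists_decomp (m+1) (by omega)
  have hc : 0 < c := by
    by_contra h0
    have hc0 : c = 0 := by omega
    rw [hc0] at hcm; simp at hcm; omega
  rw [hcm, ← Nat.mul_assoc, ← Nat.pow_add, lbN_decomp (a+c) m' hm', Nat.pow_add]
  have h2 : (2:Nat)^1 ≤ 2^c := Nat.pow_le_pow_right (by norm_num) hc
  calc 2 * 2^a = 2^a * 2 := by ring
  _ ≤ 2^a * 2^c := by apply Nat.mul_le_mul_left; simpa using h2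

-- ---------- the update chain and the read chain, over Nat ----------

-- indices touched by `update` starting at h (untruncated)
def ucMemB (h i : Nat) : Bool :=
  if _hlt : 0 < h ∧ h < i then ucMemB (h + lbN h) i else h == i
termination_by i - h
decreasing_by have := lbN_pos _hlt.1; omega

theorem uc_sound (h i : Nat) : 0 < h → ucMemB h i = true →
    h ≤ i ∧ 0 < i ∧ i - lbN i ≤ h - lbN h := by
  fun_induction ucMemB h i with
  | case1 h hlt ih =>
    intro hh hm
    have hp := lbN_pos hh
    obtain ⟨h1, h2, h3⟩ := ih (by omega) hm
    refine ⟨by omega, h2, ?_⟩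
    have hs := lbN_step hh
    omega
  | case2 h hlt =>
    intro hh hm
    have he : h = i := by simpa using hm
    subst he
    exact ⟨le_refl _, hh, le_refl _⟩

theorem uc_lt (h i : Nat) (hh : 0 < h) (hm : ucMemB h i = true) : i - lbN i < h := by
  obtain ⟨h1, h2, h3⟩ := uc_sound h i hh hm
  have := lbN_pos hh
  have := lbN_le hh
  omega

theorem uc_complete (h i : Nat) : 0 < h → h ≤ i → i - lbN i < h →
    ucMemB h i = true := by
  fun_induction ucMemB h i with
  | case1 h hlt ih =>
    intro hh hle hgt
    have hp := lbN_pos hh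
    apply ih (by omega) ?_ (by omega)
    have hi0 : 0 < i := by omega
    obtain ⟨A, M, hM, hi⟩ := exists_decomp i hi0
    have hlbi : lbN i = 2^A := by rw [hi]; exact lbN_decomp A M hM
    obtain ⟨a, m, hm, hhd⟩ := exists_decomp h hh
    have hlbh : lbN h = 2^a := by rw [hhd]; exact lbN_decomp a m hm
    have hr1 : 0 < i - h := by omega
    have hr2 : i - h < 2^A := by omega
    have hAi : 2^A ∣ i := by rw [hi]; exact Dvd.intro M rfl
    have h2 : (2:Nat)^a ∣ h := by rw [hhd]; exact Dvd.intro m rfl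
    have haA : a < A := by
      by_contra hc
      have h1 : (2:Nat)^A ∣ 2^a := Nat.pow_dvd_pow 2 (by omega)
      have h3 : (2:Nat)^A ∣ i - h := Nat.dvd_sub hAi (h1.trans h2)
      have := Nat.le_of_dvd hr1 h3
      omega
    have h4 : (2:Nat)^a ∣ i - h := Nat.dvd_sub ((Nat.pow_dvd_pow 2 (by omega)).trans hAi) h2
    have := Nat.le_of_dvd hr1 h4
    omega
  | case2 h hlt =>
    intro hh hle hgt
    have he : h = i := by omega
    simp [he]

-- indices summed by `read(T, x)`
def rcList (x : Nat) : List Nat := if 0 < x then x :: rcList (x - lbN x) else []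
termination_by x
decreasing_by have := lbN_pos (by omega); omega

theorem rc_bounds (x : Nat) : ∀ j ∈ rcList x, 0 < j ∧ j ≤ x := by
  fun_induction rcList x with
  | case1 x hx ih =>
    intro j hj
    rcases List.mem_cons.mp hj with rfl | hj
    · omega
    · have := ih j hj; omega
  | case2 x hx => simp

-- the heart of Fenwick correctness: the read chain of x meets the update chain of h
-- exactly once if h ≤ x and never otherwise
theorem rc_count (x h : Nat) (hh : 0 < h) :
    (rcList x).countP (fun j => ucMemB h j) = if h ≤ x then 1 else 0 := by
  fun_induction rcList x with
  | case1 x hx ih =>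
    rw [List.countP_cons]
    by_cases h1 : h ≤ x
    · by_cases h2 : x - lbN x < h
      · have hm : ucMemB h x = true := uc_complete h x hh h1 h2
        have ht : ¬ h ≤ x - lbN x := by omega
        rw [ih, if_neg ht]
        simp [hm, h1]
      · have hm : ucMemB h x = false := by
          by_contra hc
          have := uc_lt h x hh (by simpa using hc)
          omega
        rw [ih, if_pos (by omega), if_pos h1]
        simp [hm]
    · have hm : ucMemB h x = false := by
        by_contra hc
        have := (uc_sound h x hh (by simpa using hc)).1
        omega
      rw [ih, if_neg (by omega), if_neg h1]
      simp [hm]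
  | case2 x hx =>
    rw [if_neg (by omega)]
    simp

-- ---------- the array layer ----------

theorem getD_set (l : List Int) (n j : Nat) (a : Int) (h : n < l.length) :
    (l.set n a).getD j 0 = if n = j then a else l.getD j 0 := by
  unfold List.getD
  rw [List.getElem?_set]
  by_cases hj : n = j
  · subst hj; simp [h]
  · simp [hj]

theorem getD_replicate (n j : Nat) : (List.replicate n (0:Int)).getD j 0 = 0 := by
  unfold List.getD
  rw [List.getElem?_replicate]
  by_cases hj : j < n <;> simp [hj]

def rcSum (T : List Int) (x : Nat) : Int :=
  ((rcList x).map (fun j => T.getD j 0)).sum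

theorem readGo_sum (T : List Int) : ∀ (x : Nat) (s : Int), 0 ≤ s → s < pvM →
    readGo T (↑x) s = (s + rcSum T x) % pvM := by
  intro x
  induction x using Nat.strong_induction_on with
  | _ x ih =>
    intro s h0 h1
    by_cases hx : 0 < x
    · have hb : PySem.Int.band (↑x) (-↑x) = ↑(lbN x) := lbI_natCast x hx
      have hle := lbN_le hx
      have hp := lbN_pos hx
      have hrcx : rcSum T x = T.getD x 0 + rcSum T (x - lbN x) := by
        rw [rcSum, rcList, if_pos hx]
        simp only [List.map_cons, List.sum_cons]
        rfl
      rw [readGo, dif_pos (by exact_mod_cast hx)]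
      rw [hb, show ((x:Int) - ↑(lbN x)) = ↑(x - lbN x) by omega, pvmod_eq]
      rw [PySem.List.pyGetD_natCast]
      rw [ih (x - lbN x) (by omega) _ (Int.emod_nonneg _ (by have := pvM_pos; omega))
            (Int.emod_lt_of_pos _ pvM_pos)]
      rw [hrcx, Int.emod_add_emod]
      congr 1
      ring
    · rw [readGo, dif_neg (by exact_mod_cast hx)]
      have hx0 : x = 0 := by omega
      subst hx0
      rw [rcSum, rcList]
      simp [Int.emod_eq_of_lt h0 h1]

theorem updGo_length (T : List Int) (i v : Int) : (updGo T i v).length = T.length := by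
  fun_induction updGo T i v with
  | case1 T i hlt ih => rw [ih, List.length_set]
  | case2 T i hlt => rfl

theorem updGo_get (T : List Int) (i v : Int) :
    T.length = 50010 → 0 < i → ∀ (j : Nat), 0 < j → j ≤ 50009 →
    (updGo T i v).getD j 0 =
      if ucMemB i.toNat j then (T.getD j 0 + v) % pvM else T.getD j 0 := by
  fun_induction updGo T i v with
  | case1 T i hlt ih =>
    intro hT hi j hj0 hj1
    have hb : PySem.Int.band i (-i) = ↑(lbN i.toNat) := by
      have := lbI_natCast i.toNat (by omega)
      rwa [show ((i.toNat : Int)) = i by omega] at this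
    have hp : 0 < lbN i.toNat := lbN_pos (by omega)
    have hitn : (i + PySem.Int.band i (-i)).toNat = i.toNat + lbN i.toNat := by
      rw [hb]; omega
    have hipos : 0 < i + PySem.Int.band i (-i) := by rw [hb]; omega
    have hlen : (T.set i.toNat (PySem.Int.mod (PySem.List.pyGetD T i 0 + v) pvM)).length = 50010 := by
      rw [List.length_set]; exact hT
    rw [ih hlen hipos j hj0 hj1, hitn]
    by_cases htop : 50010 ≤ i
    · -- i = 50010: the write is out of range (a no-op here; Python raises, outside Pre_)
      have hset : T.set i.toNat (PySem.Int.mod (PySem.List.pyGetD T i 0 + v) pvM) = T := by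
        apply List.set_eq_of_length_le
        omega
      have hm1 : ucMemB (i.toNat + lbN i.toNat) j = false := by
        cases huc : ucMemB (i.toNat + lbN i.toNat) j with
        | true => have := (uc_sound _ j (by omega) huc).1; omega
        | false => rfl
      have hm2 : ucMemB i.toNat j = false := by
        cases huc : ucMemB i.toNat j with
        | true => have := (uc_sound _ j (by omega) huc).1; omega
        | false => rfl
      rw [hset, hm1, hm2]
    · have hset : ∀ (w : Int), (T.set i.toNat w).getD j 0 = if i.toNat = j then w else T.getD j 0 :=
        fun w => getD_set T i.toNat j w (by omega)
      by_cases hij : i.toNat = j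
      · -- the loop writes slot j now; the rest of the chain lies strictly above j
        have hm : ucMemB i.toNat j = true := by
          rw [ucMemB, dif_neg (by omega)]
          simp [hij]
        have hm' : ucMemB (i.toNat + lbN i.toNat) j = false := by
          cases huc : ucMemB (i.toNat + lbN i.toNat) j with
          | true => have := (uc_sound _ j (by omega) huc).1; omega
          | false => rfl
        rw [hm', hset, hm]
        simp only [Bool.false_eq_true, if_false, hij, if_pos]
        rw [pvmod_eq, PySem.List.pyGetD_of_nonneg T 0 (by omega), hij]
      · have hmeq : ucMemB i.toNat j = ucMemB (i.toNat + lbN i.toNat) j := by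
          by_cases hlt2 : i.toNat < j
          · conv_lhs => rw [ucMemB]
            rw [dif_pos ⟨by omega, hlt2⟩]
          · have hr : ucMemB (i.toNat + lbN i.toNat) j = false := by
              cases huc : ucMemB (i.toNat + lbN i.toNat) j with
              | true => have := (uc_sound _ j (by omega) huc).1; omega
              | false => rfl
            have hl : ucMemB i.toNat j = false := by
              cases huc : ucMemB i.toNat j with
              | true => have := (uc_sound _ j (by omega) huc).1; omega
              | false => rfl
            rw [hr, hl]
        rw [hset, if_neg hij, ← hmeq]
  | case2 T i hlt =>
    intro hT hi j hj0 hj1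
    have hm : ucMemB i.toNat j = false := by
      cases huc : ucMemB i.toNat j with
      | true => have := (uc_sound _ j (by omega) huc).1; omega
      | false => rfl
    rw [hm]
    simp only [Bool.false_eq_true, if_false]

-- mapped-sum congruence modulo pvM used to push an update through the read sum
theorem sum_map_ite_mod (l : List Nat) (p : Nat → Bool) (f : Nat → Int) (v : Int) :
    Int.ModEq pvM ((l.map (fun j => if p j then (f j + v) % pvM else f j)).sum)
      ((l.map f).sum + (l.countP p) * v) := by
  induction l with
  | nil => simp
  | cons a l ih =>
    simp only [List.map_cons, List.sum_cons, List.countP_cons]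
    by_cases hp : p a
    · rw [hp, show (if (true:Bool) = true then (1:Nat) else 0) = 1 from rfl,
          Nat.cast_add, Nat.cast_one]
      have h2 := (Int.mod_modEq (f a + v) pvM).add ih
      refine h2.trans ?_
      rw [show f a + v + ((l.map f).sum + (↑(l.countP p)) * v)
          = f a + (l.map f).sum + ((↑(l.countP p) : Int) + 1) * v from by ring]
    · have hp' : p a = false := by simpa using hp
      rw [hp', show (if (false:Bool) = true then (1:Nat) else 0) = 0 from rfl,
          show (if (false:Bool) = true then (f a + v) % pvM else f a) = f a from rfl,
          Nat.add_zero]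
      have h2 := (Int.ModEq.refl (n := pvM) (f a)).add ih
      refine h2.trans ?_
      rw [show f a + ((l.map f).sum + (↑(l.countP p)) * v)
          = f a + (l.map f).sum + (↑(l.countP p)) * v from by ring]

-- ---------- relating the two inner loops ----------

-- B's running sum over the picked list
def sumLt (picked : List (Int × Int)) (h : Int) : Int :=
  picked.foldl (fun s p => if p.1 < h then s + p.2 else s) 0

-- the two inner loop bodies, with the subset i fixed
def stepA (i : Int) (st : List Int × Int) (p : Int × Int) : List Int × Int :=
  if PySem.Int.band (i >>> (p.2 - 1).toNat) 1 = 1 then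
    let v := readGo st.1 (p.1 - 1) 0 + 1
    (updGo st.1 p.1 v, PySem.Int.mod (st.2 + v) pvM)
  else st

def stepB (i : Int) (st : List (Int × Int) × Int) (p : Int × Int) : List (Int × Int) × Int :=
  if PySem.Int.band (i >>> (p.2 - 1).toNat) 1 = 1 then
    let s := st.1.foldl (fun s q => if q.1 < p.1 then s + q.2 else s) 0
    let dp := PySem.Int.mod (1 + s) pvM
    (st.1 ++ [(p.1, dp)], PySem.Int.mod (st.2 + dp) pvM)
  else st

-- invariant: the Fenwick array answers exactly the prefix sums of the picked list, mod pvM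
def pvInv (T : List Int) (picked : List (Int × Int)) : Prop :=
  T.length = 50010 ∧
  ∀ x : Nat, x ≤ 50009 → readGo T (↑x) 0 = (sumLt picked ((x:Int)+1)) % pvM

-- a set bit at position c-1 of i < 2^K forces c ≤ K
theorem qual_le (i c K : Int) (hi0 : 0 ≤ i) (hiK : i < 2 ^ K.toNat) (hc : 1 ≤ c) (hK : 0 ≤ K)
    (hb : PySem.Int.band (i >>> (c - 1).toNat) 1 = 1) : c ≤ K := by
  by_contra hcK
  obtain ⟨n, rfl⟩ : ∃ n : Nat, i = ↑n := ⟨i.toNat, by omega⟩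
  have hn : n < 2 ^ K.toNat := by exact_mod_cast hiK
  have hs : K.toNat ≤ (c - 1).toNat := by omega
  have hz : n >>> (c - 1).toNat = 0 := by
    rw [Nat.shiftRight_eq_div_pow]
    apply Nat.div_eq_of_lt
    calc n < 2 ^ K.toNat := hn
    _ ≤ 2 ^ (c-1).toNat := Nat.pow_le_pow_right (by norm_num) hs
  have hcast : ((n:Int) >>> (c - 1).toNat) = ((n >>> (c - 1).toNat : Nat) : Int) := rfl
  rw [hcast, hz] at hb
  simp [PySem.Int.band] at hb

theorem sumLt_append (picked : List (Int × Int)) (q : Int × Int) (y : Int) :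
    sumLt (picked ++ [q]) y = if q.1 < y then sumLt picked y + q.2 else sumLt picked y := by
  unfold sumLt
  rw [List.foldl_append]
  simp

-- one step of the two inner loops preserves the invariant and keeps the totals equal
theorem inner_step (i K : Int) (hK : 0 ≤ K) (hi0 : 0 ≤ i) (hiK : i < 2 ^ K.toNat)
    (T : List Int) (picked : List (Int × Int)) (t : Int)
    (hInv : pvInv T picked) (p : Int × Int)
    (hp : 1 ≤ p.2 ∧ (p.2 ≤ K → 1 ≤ p.1 ∧ p.1 ≤ 50008)) :
    pvInv (stepA i (T, t) p).1 (stepB i (picked, t) p).1 ∧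
    (stepA i (T, t) p).2 = (stepB i (picked, t) p).2 := by
  obtain ⟨hT, hread⟩ := hInv
  by_cases hb : PySem.Int.band (i >>> (p.2 - 1).toNat) 1 = 1
  · have hcK : p.2 ≤ K := qual_le i p.2 K hi0 hiK hp.1 hK hb
    obtain ⟨hh1, hh2⟩ := hp.2 hcK
    have hA : stepA i (T, t) p =
        (updGo T p.1 (readGo T (p.1 - 1) 0 + 1), PySem.Int.mod (t + (readGo T (p.1 - 1) 0 + 1)) pvM) := by
      simp only [stepA, if_pos hb]
    have hB : stepB i (picked, t) p =
        (picked ++ [(p.1, PySem.Int.mod (1 + sumLt picked p.1) pvM)],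
         PySem.Int.mod (t + PySem.Int.mod (1 + sumLt picked p.1) pvM) pvM) := by
      simp only [stepB, if_pos hb]
      rfl
    rw [hA, hB]
    have hx0' : p.1 - 1 = ((p.1 - 1).toNat : Int) := by omega
    have hreadx : readGo T (p.1 - 1) 0 = (sumLt picked p.1) % pvM := by
      rw [hx0', hread (p.1 - 1).toNat (by omega),
          show (((p.1 - 1).toNat : Int) + 1) = p.1 by omega]
    -- v and dp agree modulo pvM
    have hvdp : Int.ModEq pvM (readGo T (p.1 - 1) 0 + 1) (PySem.Int.mod (1 + sumLt picked p.1) pvM) := by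
      rw [hreadx, pvmod_eq]
      have h1 : Int.ModEq pvM (sumLt picked p.1 % pvM + 1) (sumLt picked p.1 + 1) :=
        (Int.mod_modEq _ _).add_right 1
      refine h1.trans ?_
      rw [show sumLt picked p.1 + 1 = 1 + sumLt picked p.1 by ring]
      exact (Int.mod_modEq _ _).symm
    refine ⟨⟨by rw [updGo_length]; exact hT, ?_⟩, ?_⟩
    · intro x hx
      have hreadA := readGo_sum (updGo T p.1 (readGo T (p.1 - 1) 0 + 1)) x 0 (le_refl 0) pvM_pos
      have hreadT := readGo_sum T x 0 (le_refl 0) pvM_pos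
      simp only [zero_add] at hreadA hreadT
      rw [hreadA, sumLt_append]
      have hmap : rcSum (updGo T p.1 (readGo T (p.1 - 1) 0 + 1)) x
          = ((rcList x).map (fun j => if ucMemB p.1.toNat j
              then (T.getD j 0 + (readGo T (p.1 - 1) 0 + 1)) % pvM else T.getD j 0)).sum := by
        unfold rcSum
        apply congrArg
        apply List.map_congr_left
        intro j hj
        obtain ⟨hj1, hj2⟩ := rc_bounds x j hj
        exact updGo_get T p.1 _ hT (by omega) j hj1 (by omega)
      have hEq1 : Int.ModEq pvM (rcSum (updGo T p.1 (readGo T (p.1 - 1) 0 + 1)) x)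
          (rcSum T x + ((rcList x).countP (fun j => ucMemB p.1.toNat j)) * (readGo T (p.1 - 1) 0 + 1)) := by
        rw [hmap]
        exact sum_map_ite_mod (rcList x) (fun j => ucMemB p.1.toNat j) (fun j => T.getD j 0) _
      have hEq2 : Int.ModEq pvM (rcSum T x) (sumLt picked ((x:Int)+1)) := by
        show rcSum T x % pvM = sumLt picked ((x:Int)+1) % pvM
        rw [← hreadT, hread x hx]
      rw [rc_count x p.1.toNat (by omega)] at hEq1
      by_cases hhx : p.1.toNat ≤ x
      · rw [if_pos hhx] at hEq1
        rw [if_pos (show p.1 < (x:Int)+1 by omega)]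
        show _ % pvM = _ % pvM
        refine (hEq1.trans ?_)
        simp only [Nat.cast_one, one_mul]
        exact hEq2.add hvdp
      · rw [if_neg hhx] at hEq1
        rw [if_neg (show ¬ p.1 < (x:Int)+1 by omega)]
        show _ % pvM = _ % pvM
        refine (hEq1.trans ?_)
        simp only [Nat.cast_zero, zero_mul, add_zero]
        exact hEq2
    · show PySem.Int.mod (t + (readGo T (p.1 - 1) 0 + 1)) pvM
        = PySem.Int.mod (t + PySem.Int.mod (1 + sumLt picked p.1) pvM) pvM
      rw [pvmod_eq, pvmod_eq]
      exact (Int.ModEq.refl t).add hvdp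
  · simp only [stepA, stepB, if_neg hb]
    exact ⟨⟨hT, hread⟩, by trivial⟩

theorem inner_fold (i K : Int) (hK : 0 ≤ K) (hi0 : 0 ≤ i) (hiK : i < 2 ^ K.toNat) :
    ∀ (E : List (Int × Int)) (T : List Int) (picked : List (Int × Int)) (t : Int),
    pvInv T picked →
    (∀ p ∈ E, 1 ≤ p.2 ∧ (p.2 ≤ K → 1 ≤ p.1 ∧ p.1 ≤ 50008)) →
    (E.foldl (stepA i) (T, t)).2 = (E.foldl (stepB i) (picked, t)).2 := by
  intro E
  induction E with
  | nil => intro T picked t hInv hE; exact rfl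
  | cons p E ih =>
    intro T picked t hInv hE
    simp only [List.foldl_cons]
    obtain ⟨hInv', ht⟩ := inner_step i K hK hi0 hiK T picked t hInv p (hE p List.mem_cons_self)
    have h1 : stepA i (T, t) p = ((stepA i (T, t) p).1, (stepA i (T, t) p).2) := rfl
    have h2 : stepB i (picked, t) p = ((stepB i (picked, t) p).1, (stepB i (picked, t) p).2) := rfl
    rw [h1, h2, ht]
    exact ih _ _ _ hInv' (fun q hq => hE q (List.mem_cons_of_mem _ hq))

-- the initial states satisfy the invariant
theorem pvInv_init : pvInv (List.replicate 50010 (0:Int)) [] := by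
  constructor
  · rw [List.length_replicate]
  · intro x hx
    have hz : rcSum (List.replicate 50010 (0:Int)) x = 0 := by
      rw [rcSum]
      have hm : (rcList x).map (fun j => (List.replicate 50010 (0:Int)).getD j 0)
          = (rcList x).map (fun _ => (0:Int)) := by
        apply List.map_congr_left
        intro j hj
        exact getD_replicate 50010 j
      rw [hm]
      exact List.sum_eq_zero (fun y hy => by
        obtain ⟨z, hz, hzy⟩ := List.mem_map.mp hy
        omega)
    have hr := readGo_sum (List.replicate 50010 (0:Int)) x 0 (le_refl 0) pvM_pos
    rw [hr, hz]
    norm_num [sumLt]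

-- the two popcount helpers are the same function
theorem cb_eq (b c : Int) : cbGo b c = cbGoB b c := by
  fun_induction cbGo b c with
  | case1 b c hb ih => rw [cbGoB, dif_pos hb]; exact ih
  | case2 b c hb => rw [cbGoB, dif_neg hb]

-- the inner loop of each port, rewritten as a fold of its step function over A.take N
theorem inner_loop_A (N : Int) (A : List (Int × Int)) (i : Int)
    (hN0 : 0 ≤ N) (hNlen : N ≤ A.length) :
    (PySem.List.pyRange 0 N).foldl (fun (st : List Int × Int) j =>
      let hc := PySem.List.pyGetD A j (0, 0)
      if PySem.Int.band (i >>> (hc.2 - 1).toNat) 1 = 1 then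
        let v := readGo st.1 (hc.1 - 1) 0 + 1
        (updGo st.1 hc.1 v, PySem.Int.mod (st.2 + v) pvM)
      else st) (List.replicate 50010 (0:Int), 0)
    = (A.take N.toNat).foldl (stepA i) (List.replicate 50010 (0:Int), 0) := by
  have hlen : ((A.take N.toNat).length : Int) = N := by
    rw [List.length_take]
    omega
  have hr : PySem.List.pyRange 0 N = PySem.List.pyRange 0 (PySem.List.len (A.take N.toNat)) := by
    rw [PySem.List.len_eq, hlen]
  rw [hr]
  rw [PySem.List.foldl_congr_mem _ _ (fun st j => stepA i st (PySem.List.pyGetD (A.take N.toNat) j ((0:Int), (0:Int)))) _ ?_]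
  · have := PySem.List.foldl_pyRange_pyGetD (A.take N.toNat) ((0:Int), (0:Int)) (stepA i)
      (List.replicate 50010 (0:Int), (0:Int)) (a := 0) (le_refl 0)
    rw [this]
    simp only [Int.toNat_zero, List.drop_zero]
  · intro st j hj
    obtain ⟨hj0, hj1⟩ := PySem.List.mem_pyRange_one.mp hj
    rw [PySem.List.len_eq, hlen] at hj1
    have hget : PySem.List.pyGetD A j ((0:Int), (0:Int)) = PySem.List.pyGetD (A.take N.toNat) j ((0:Int), (0:Int)) := by
      rw [PySem.List.pyGetD_eq_getElem _ _ hj0 (by omega),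
          PySem.List.pyGetD_eq_getElem _ _ hj0 (by rw [List.length_take]; push_cast; omega)]
      rw [List.getElem_take]
    rw [hget]
    rfl

theorem inner_loop_B (N : Int) (A : List (Int × Int)) (i : Int)
    (hN0 : 0 ≤ N) (hNlen : N ≤ A.length) :
    (PySem.List.pyRange 0 N).foldl (fun (st : List (Int × Int) × Int) j =>
      let hc := PySem.List.pyGetD A j (0, 0)
      if PySem.Int.band (i >>> (hc.2 - 1).toNat) 1 = 1 then
        let s := st.1.foldl (fun s p => if p.1 < hc.1 then s + p.2 else s) 0
        let dp := PySem.Int.mod (1 + s) pvM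
        (st.1 ++ [(hc.1, dp)], PySem.Int.mod (st.2 + dp) pvM)
      else st) ([], 0)
    = (A.take N.toNat).foldl (stepB i) ([], 0) := by
  have hlen : ((A.take N.toNat).length : Int) = N := by
    rw [List.length_take]
    omega
  have hr : PySem.List.pyRange 0 N = PySem.List.pyRange 0 (PySem.List.len (A.take N.toNat)) := by
    rw [PySem.List.len_eq, hlen]
  rw [hr]
  rw [PySem.List.foldl_congr_mem _ _ (fun st j => stepB i st (PySem.List.pyGetD (A.take N.toNat) j ((0:Int), (0:Int)))) _ ?_]
  · have := PySem.List.foldl_pyRange_pyGetD (A.take N.toNat) ((0:Int), (0:Int)) (stepB i)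
      (([] : List (Int × Int)), (0:Int)) (a := 0) (le_refl 0)
    rw [this]
    simp only [Int.toNat_zero, List.drop_zero]
  · intro st j hj
    obtain ⟨hj0, hj1⟩ := PySem.List.mem_pyRange_one.mp hj
    rw [PySem.List.len_eq, hlen] at hj1
    have hget : PySem.List.pyGetD A j ((0:Int), (0:Int)) = PySem.List.pyGetD (A.take N.toNat) j ((0:Int), (0:Int)) := by
      rw [PySem.List.pyGetD_eq_getElem _ _ hj0 (by omega),
          PySem.List.pyGetD_eq_getElem _ _ hj0 (by rw [List.length_take]; push_cast; omega)]
      rw [List.getElem_take]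
    rw [hget]
    rfl

-- ===== VERDICT (by name: the statement is the Claim_ definition above) =====
theorem candles_counting_spec : Claim_equal_candles_counting := by
  intro N K A hdom hpre
  obtain ⟨hNlen, hK0, hA⟩ := hpre
  unfold Spec_candles_counting candles_counting candles_counting_alt
  apply PySem.List.foldl_congr_mem
  intro R i hi
  obtain ⟨hi0, hiK⟩ := PySem.List.mem_pyRange_one.mp hi
  have hiK' : i < 2 ^ K.toNat := by exact_mod_cast hiK
  simp only []
  by_cases hN0 : 0 ≤ N
  · rw [inner_loop_A N A i hN0 hNlen, inner_loop_B N A i hN0 hNlen]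
    rw [inner_fold i K hK0 hi0 hiK' (A.take N.toNat) (List.replicate 50010 (0:Int)) [] 0
        pvInv_init hA]
    rw [cb_eq]
  · -- N < 0: both inner loops are empty, both totals are 0
    rw [PySem.List.pyRange_one_eq_nil (by omega : N ≤ 0)]
    simp only [List.foldl_nil]
    rw [cb_eq]
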